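-- pv_equiv track=rewrite | github.com/duthd3/Programmers | 코딩테스트입문/숨어있는숫자의 덧셈.py | solution
-- ===== SOURCE A (Python) =====
-- def solution(my_string):
--     answer = 0
--     str = "0"
--     for i in my_string:
--         if i.isdigit():
--             str += i
--         else:
--             answer += int(str)
--             str = "0"
--     if str != "0":
--         answer += int(str)
--     return answer
-- ===== SOURCE B (Python) =====
-- from itertools import groupby
--
-- def solution(my_string):
--     return sum(int("".join(g)) for k, g in groupby(my_string, str.isdigit) if k)
-- ===== Notes on version B (the rewrite author's own statement) =====
-- stated objective: idiomatic
-- what changed: A's incremental accumulator/flush state machine (a running string buffer seeded with a zero digit, flushed through int() on every non-digit character and once at the end) is replaced by a partition-then-sum decomposition: itertools.groupby splits the string into maximal runs of equal digit-ness and B sums int(run) over the digit-keyed runs.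
import Mathlib
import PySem

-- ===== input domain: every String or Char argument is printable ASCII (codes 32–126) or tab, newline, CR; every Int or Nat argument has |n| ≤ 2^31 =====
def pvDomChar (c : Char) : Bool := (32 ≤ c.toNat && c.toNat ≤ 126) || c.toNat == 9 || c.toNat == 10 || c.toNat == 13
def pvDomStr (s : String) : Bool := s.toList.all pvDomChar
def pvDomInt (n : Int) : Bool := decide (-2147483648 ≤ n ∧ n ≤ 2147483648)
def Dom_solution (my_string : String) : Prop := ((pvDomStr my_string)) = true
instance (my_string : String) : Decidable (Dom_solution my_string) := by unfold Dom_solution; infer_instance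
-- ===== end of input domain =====

-- B replaces A's accumulator/flush state machine by a partition-into-runs
-- (itertools.groupby) then sum decomposition; objective: idiomatic.

-- ===== PORT A =====
-- A's for-loop with state (answer, str); str starts as "0" and collects "0"+digits,
-- so int(str) always succeeds and `.getD 0` on ofChars? is exact here.
def solutionGo (answer : Int) (str : List Char) : List Char → Int × List Char
  | [] => (answer, str)
  | i :: rest =>
    if PySem.Chars.isdigit i then
      solutionGo answer (str ++ [i]) rest
    else
      solutionGo (answer + (PySem.Int.ofChars? str).getD 0) ['0'] rest

def solution (my_string : String) : Int :=
  let r := solutionGo 0 ['0'] my_string.toList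
  if r.2 ≠ ['0'] then r.1 + (PySem.Int.ofChars? r.2).getD 0 else r.1

-- ===== PORT B =====
-- itertools.groupby(s, key): maximal runs of equal key value, as (key, run) pairs.
def pyGroupby (key : Char → Bool) : List Char → List (Bool × List Char)
  | [] => []
  | c :: cs =>
    (key c, c :: cs.takeWhile (fun x => key x == key c)) ::
      pyGroupby key (cs.dropWhile (fun x => key x == key c))
  termination_by l => l.length
  decreasing_by
    have := List.length_dropWhile_le (fun x => key x == key c) cs
    simp only [List.length_cons]
    omega

-- True-keyed groups are nonempty all-digit runs, so int(''.join(g)) always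
-- succeeds and `.getD 0` on ofChars? is exact here.
def solution_alt (my_string : String) : Int :=
  (((pyGroupby PySem.Chars.isdigit my_string.toList).filter (fun g => g.1)).map
      (fun g => (PySem.Int.ofChars? g.2).getD 0)).sum

-- ===== PRECONDITION & SPEC =====
def Spec_solution (my_string : String) (out : Int) : Prop := out = solution_alt my_string
instance (my_string : String) (out : Int) : Decidable (Spec_solution my_string out) := by unfold Spec_solution; infer_instance

-- ===== CLAIM (what is proved, stated in full; the proofs are below) =====
def Claim_equal_solution : Prop := ∀ (my_string : String), Dom_solution my_string → Spec_solution my_string (solution my_string)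

-- ===== LEMMAS AND PROOFS =====

-- every PySem digit char is one of the ten ASCII digits
lemma digit_cases {c : Char} (h : PySem.Chars.isdigit c = true) :
    c = '0' ∨ c = '1' ∨ c = '2' ∨ c = '3' ∨ c = '4' ∨ c = '5' ∨ c = '6' ∨ c = '7' ∨ c = '8' ∨ c = '9' := by
  simp only [PySem.Chars.isdigit, Bool.and_eq_true, decide_eq_true_eq, Char.le_def] at h
  obtain ⟨h1, h2⟩ := h
  have h1' : 48 ≤ c.toNat := h1
  have h2' : c.toNat ≤ 57 := h2
  have hc : c = Char.ofNat c.toNat := by rw [Char.ofNat_toNat]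
  interval_cases h : c.toNat <;> simp_all

-- the Int value A and B read off a buffer / run
def pint (cs : List Char) : Int := (PySem.Int.ofChars? cs).getD 0

lemma dropWhile_space_digits (cs : List Char)
    (hdig : ∀ c ∈ cs, PySem.Chars.isdigit c = true) :
    List.dropWhile PySem.Int.isIntSpace cs = cs ∧
      List.dropWhile PySem.Int.isIntSpace cs.reverse = cs.reverse := by
  have hsp : ∀ c ∈ cs, ¬ (PySem.Int.isIntSpace c = true) := by
    intro c hc
    rcases digit_cases (hdig c hc) with rfl|rfl|rfl|rfl|rfl|rfl|rfl|rfl|rfl|rfl <;> decide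
  constructor
  · cases cs with
    | nil => rfl
    | cons c t => rw [List.dropWhile_cons_of_neg (by simpa using hsp c (by simp))]
  · cases h : cs.reverse with
    | nil => rfl
    | cons c t =>
      rw [List.dropWhile_cons_of_neg]
      have : c ∈ cs := by rw [← List.mem_reverse, h]; simp
      simpa using hsp c this

-- int("0" + run) = int(run) for a digit run (the leading zero does not change the value)
lemma pint_zero_cons (ds : List Char) (hdig : ∀ c ∈ ds, PySem.Chars.isdigit c = true) :
    pint ('0' :: ds) = pint ds := by
  cases ds with
  | nil => decide
  | cons d t =>
    have hd0 : ∀ c ∈ '0' :: d :: t, PySem.Chars.isdigit c = true := by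
      intro c hc
      rcases List.mem_cons.mp hc with rfl | hc'
      · decide
      · exact hdig c hc'
    obtain ⟨h1, h2⟩ := dropWhile_space_digits ('0' :: d :: t) hd0
    obtain ⟨h1', h2'⟩ := dropWhile_space_digits (d :: t) hdig
    rw [pint, pint]
    simp only [PySem.Int.ofChars?, h1, h2, h1', h2', List.reverse_reverse]
    split
    · rename_i ds heq
      exact absurd heq (by simp)
    · rename_i ds heq
      exact absurd heq (by simp)
    · split
      · rename_i ds heq
        injection heq with hc ht
        exact absurd (hdig d (by simp)) (by rw [hc]; decide)
      · rename_i ds heq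
        injection heq with hc ht
        exact absurd (hdig d (by simp)) (by rw [hc]; decide)
      · rcases digit_cases (hdig d (by simp)) with rfl|rfl|rfl|rfl|rfl|rfl|rfl|rfl|rfl|rfl <;> rfl

-- A's trailing flush
def finA (r : Int × List Char) : Int :=
  if r.2 ≠ ['0'] then r.1 + (PySem.Int.ofChars? r.2).getD 0 else r.1

lemma finA_buf (ans : Int) (ds : List Char) :
    finA (ans, '0' :: ds) = ans + pint ('0' :: ds) := by
  cases ds with
  | nil =>
    have : pint ['0'] = 0 := by decide
    simp [finA, this]
  | cons e t =>
    rw [finA, if_pos (by simp)]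
    rfl

-- B's sum over a character list
def sumB (cs : List Char) : Int :=
  (((pyGroupby PySem.Chars.isdigit cs).filter (fun g => g.1)).map
      (fun g => (PySem.Int.ofChars? g.2).getD 0)).sum

lemma sumB_nil : sumB [] = 0 := by simp [sumB, pyGroupby]

lemma sumB_cons_digit {c : Char} (cs : List Char) (hc : PySem.Chars.isdigit c = true) :
    sumB (c :: cs) = pint (c :: cs.takeWhile PySem.Chars.isdigit)
      + sumB (cs.dropWhile PySem.Chars.isdigit) := by
  rw [sumB, pyGroupby]
  simp [hc, List.filter, sumB, pint]

lemma sumB_cons_nondigit {c : Char} (cs : List Char) (hc : PySem.Chars.isdigit c = false) :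
    sumB (c :: cs) = sumB (cs.dropWhile (fun x => !(PySem.Chars.isdigit x))) := by
  rw [sumB, pyGroupby]
  simp [hc, List.filter, sumB]

-- value of the run B reads next, written with A's "0"-prefixed buffer
lemma sumB_skip (cs : List Char) :
    sumB (cs.dropWhile (fun x => !(PySem.Chars.isdigit x))) =
      pint ('0' :: cs.takeWhile PySem.Chars.isdigit)
        + sumB (cs.dropWhile PySem.Chars.isdigit) := by
  cases cs with
  | nil =>
    have : pint ['0'] = 0 := by decide
    simp [sumB_nil, this]
  | cons e t =>
    by_cases he : PySem.Chars.isdigit e = true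
    · rw [List.dropWhile_cons_of_neg (by simp [he]), List.takeWhile_cons_of_pos he,
        List.dropWhile_cons_of_pos he]
      rw [pint_zero_cons (e :: t.takeWhile PySem.Chars.isdigit) (by
        intro x hx
        rcases List.mem_cons.mp hx with rfl | hx'
        · exact he
        · exact List.mem_takeWhile_imp hx')]
      exact sumB_cons_digit t he
    · have he' : PySem.Chars.isdigit e = false := by simpa using he
      rw [List.dropWhile_cons_of_pos (by simp [he']),
        List.takeWhile_cons_of_neg (by simp [he']), List.dropWhile_cons_of_neg (by simp [he'])]
      rw [sumB_cons_nondigit t he']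
      have : pint ['0'] = 0 := by decide
      simp [this]

lemma sumB_split (cs : List Char) :
    sumB cs = pint ('0' :: cs.takeWhile PySem.Chars.isdigit)
      + sumB (cs.dropWhile PySem.Chars.isdigit) := by
  cases cs with
  | nil =>
    have : pint ['0'] = 0 := by decide
    simp [sumB_nil, this]
  | cons e t =>
    by_cases he : PySem.Chars.isdigit e = true
    · rw [List.takeWhile_cons_of_pos he, List.dropWhile_cons_of_pos he]
      rw [pint_zero_cons (e :: t.takeWhile PySem.Chars.isdigit) (by
        intro x hx
        rcases List.mem_cons.mp hx with rfl | hx'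
        · exact he
        · exact List.mem_takeWhile_imp hx')]
      exact sumB_cons_digit t he
    · have he' : PySem.Chars.isdigit e = false := by simpa using he
      rw [List.takeWhile_cons_of_neg (by simp [he']), List.dropWhile_cons_of_neg (by simp [he'])]
      rw [sumB_cons_nondigit t he', sumB_skip t]
      have : pint ['0'] = 0 := by decide
      simp [this]

-- the main invariant of A's loop
lemma mainA (cs : List Char) : ∀ (ans : Int) (ds : List Char),
    finA (solutionGo ans ('0' :: ds) cs) =
      ans + pint ('0' :: (ds ++ cs.takeWhile PySem.Chars.isdigit))
        + sumB (cs.dropWhile PySem.Chars.isdigit) := by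
  induction cs with
  | nil =>
    intro ans ds
    simp only [solutionGo, List.takeWhile_nil, List.dropWhile_nil, List.append_nil, sumB_nil]
    rw [finA_buf ans ds]
    ring
  | cons c cs ih =>
    intro ans ds
    by_cases hc : PySem.Chars.isdigit c = true
    · rw [List.takeWhile_cons_of_pos hc, List.dropWhile_cons_of_pos hc]
      have hstep : solutionGo ans ('0' :: ds) (c :: cs) = solutionGo ans ('0' :: (ds ++ [c])) cs := by
        simp [solutionGo, hc]
      rw [hstep, ih ans (ds ++ [c])]
      simp [List.append_assoc]
    · have hc' : PySem.Chars.isdigit c = false := by simpa using hc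
      rw [List.takeWhile_cons_of_neg (by simp [hc']), List.dropWhile_cons_of_neg (by simp [hc'])]
      have hstep : solutionGo ans ('0' :: ds) (c :: cs) =
          solutionGo (ans + (PySem.Int.ofChars? ('0' :: ds)).getD 0) ['0'] cs := by
        simp [solutionGo, hc']
      rw [hstep]
      rw [show (['0'] : List Char) = '0' :: ([] : List Char) from rfl]
      rw [ih _ []]
      rw [sumB_cons_nondigit cs hc', sumB_skip cs]
      simp only [pint, List.nil_append, List.append_nil]
      ring

-- ===== VERDICT (by name: the statement is the Claim_ definition above) =====
theorem solution_spec : Claim_equal_solution := by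
  intro s _
  unfold Spec_solution
  have h1 : solution s = finA (solutionGo 0 ['0'] s.toList) := rfl
  have h2 : solution_alt s = sumB s.toList := rfl
  rw [h1, h2, show (['0'] : List Char) = '0' :: ([] : List Char) from rfl,
    mainA s.toList 0 [], sumB_split s.toList]
  simp
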